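-- pv_equiv track=rewrite | github.com/adrijasurroy/DSA | hashing_approach.py | countNumWays
-- ===== SOURCE A (Python) =====
-- def countNumWays(s, k):
--     n = len(s)
--     result = 0
--
--     # Helper function to check if a substring is lexicographically smaller
--     def is_smaller(sub):
--         rev_sub = sub[::-1]
--         return rev_sub < sub
--
--     # Iterate through all substrings of length k
--     for i in range(n - k + 1):
--         substring = s[i:i + k]
--
--         # Check if reversing the substring makes the string lexicographically smaller
--         if is_smaller(substring):
--             result += 1
--
--     return result
-- ===== SOURCE B (Python) =====
-- def countNumWays(s, k):
--     # Two pointers walk in from both ends of each window over s itself and decide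
--     # at the first mismatched end pair; precomputed run lengths let equal runs be
--     # skipped in one jump, so no substring/reverse is ever built.
--     n = len(s)
--     run = [0] * n   # run[p]: length of the run of s[p]'s character starting at p
--     for p in range(n - 1, -1, -1):
--         run[p] = run[p + 1] + 1 if p + 1 < n and s[p + 1] == s[p] else 1
--     lrun = [0] * n  # lrun[q]: length of the run of s[q]'s character ending at q
--     for q in range(n):
--         lrun[q] = lrun[q - 1] + 1 if q >= 1 and s[q - 1] == s[q] else 1
--     count = 0
--     for i in range(n - k + 1):
--         lo, hi = i, i + k - 1
--         while lo < hi and s[lo] == s[hi]: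
--             t = min(run[lo], lrun[hi], (hi - lo + 1) // 2)
--             lo += t
--             hi -= t
--         if lo < hi and s[hi] < s[lo]:
--             count += 1
--     return count
-- ===== Notes on version B (the rewrite author's own statement) =====
-- stated objective: faster
-- what changed: Per window, A allocates the k-char substring, allocates its reverse and runs a full lexicographic comparison; B walks two pointers inward over s itself, skipping precomputed equal-character runs in one jump, and decides at the first mismatched end pair, with no slicing or reversal.
-- outside the precondition, e.g. on countNumWays('abcabc', -2): A returns 1, B returns 0
import Mathlib
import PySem

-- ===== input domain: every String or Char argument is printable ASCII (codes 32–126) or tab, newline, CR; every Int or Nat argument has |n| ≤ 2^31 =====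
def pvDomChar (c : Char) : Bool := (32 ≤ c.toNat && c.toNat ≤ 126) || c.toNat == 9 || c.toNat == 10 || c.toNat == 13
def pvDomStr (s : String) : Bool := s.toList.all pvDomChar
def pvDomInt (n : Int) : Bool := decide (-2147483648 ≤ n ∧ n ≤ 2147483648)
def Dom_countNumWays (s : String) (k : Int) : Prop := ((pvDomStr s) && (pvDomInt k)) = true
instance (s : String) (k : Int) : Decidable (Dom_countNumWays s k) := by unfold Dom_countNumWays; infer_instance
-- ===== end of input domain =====

-- B replaces A's per-window slice/reverse/compare with an in-place two-pointer scan that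
-- jumps over precomputed equal-character runs and decides at the first mismatched end
-- pair; return values proved equal for 0 ≤ k.

-- ===== PORT A =====
-- is_smaller: rev_sub < sub; Python str '<' is Lean '<' on List Char (PYSEM.md)
def isSmallerA (sub : List Char) : Bool :=
  let rev_sub := sub.reverse
  decide (rev_sub < sub)

def countNumWays (s : String) (k : Int) : Int :=
  let n : Int := PySem.Str.len s
  (PySem.List.pyRange 0 (n - k + 1) 1).foldl
    (fun result i =>
      let substring := PySem.List.slice s.toList (some i) (some (i + k))
      if isSmallerA substring then result + 1 else result) 0

-- ===== PORT B =====
-- run[p]: length of the run of equal characters starting at p (B builds it right-to-left;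
-- the structural recursion below peels from the left and looks at the already-built tail)
def runList : List Char → List Int
  | [] => []
  | c :: rest =>
    (match rest, runList rest with
     | c' :: _, v :: _ => if c' = c then v + 1 else 1
     | _, _ => (1 : Int)) :: runList rest

-- lrun[q]: length of the run of equal characters ending at q (B builds it left-to-right;
-- prev carries the previous character and its lrun value)
def lrunAux : Option (Char × Int) → List Char → List Int
  | _, [] => []
  | prev, c :: rest =>
    let v : Int := match prev with
      | some (c', v') => if c' = c then v' + 1 else 1
      | none => 1
    v :: lrunAux (some (c, v)) rest

-- facts needed by tpJump's termination proof (cited in decreasing_by)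
theorem runList_length (cs : List Char) : (runList cs).length = cs.length := by
  induction cs with
  | nil => rfl
  | cons c rest ih => simp [runList, ih]

theorem runList_cons_cons (c c' : Char) (rest' : List Char) :
    ∃ v vs, runList (c' :: rest') = v :: vs ∧
      runList (c :: c' :: rest') = (if c' = c then v + 1 else 1) :: v :: vs := by
  cases hr : runList (c' :: rest') with
  | nil => exact absurd (congrArg List.length hr) (by rw [runList_length]; simp)
  | cons v vs =>
    refine ⟨v, vs, rfl, ?_⟩
    have hstep : runList (c :: c' :: rest') =
        (match c' :: rest', runList (c' :: rest') with
         | c'' :: _, w :: _ => if c'' = c then w + 1 else 1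
         | _, _ => (1 : Int)) :: runList (c' :: rest') := rfl
    rw [hstep, hr]

theorem runList_mem_pos (cs : List Char) : ∀ x ∈ runList cs, 1 ≤ x := by
  induction cs with
  | nil => intro x hx; simp [runList] at hx
  | cons c rest ih =>
    intro x hx
    cases rest with
    | nil =>
      simp [runList] at hx
      omega
    | cons c' rest' =>
      obtain ⟨v, vs, hr, hcc⟩ := runList_cons_cons c c' rest'
      rw [hcc, List.mem_cons] at hx
      rcases hx with rfl | hx
      · have hv : 1 ≤ v := ih v (by rw [hr]; exact List.mem_cons_self)
        split <;> omega
      · exact ih x (by rw [hr]; exact hx)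

theorem runList_getD_pos (cs : List Char) (p : Nat) (hp : p < cs.length) :
    1 ≤ (runList cs).getD p 0 := by
  have hl : p < (runList cs).length := by rw [runList_length]; exact hp
  rw [List.getD_eq_getElem?_getD, List.getElem?_eq_getElem hl]
  exact runList_mem_pos cs _ (List.getElem_mem hl)

theorem lrunAux_length (prev : Option (Char × Int)) (cs : List Char) :
    (lrunAux prev cs).length = cs.length := by
  induction cs generalizing prev with
  | nil => rfl
  | cons c rest ih => simp [lrunAux, ih]

theorem lrunAux_mem_pos (cs : List Char) : ∀ (prev : Option (Char × Int)),
    (∀ c0 v0, prev = some (c0, v0) → 0 ≤ v0) → ∀ x ∈ lrunAux prev cs, 1 ≤ x := by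
  induction cs with
  | nil => intro prev hprev x hx; simp [lrunAux] at hx
  | cons c rest ih =>
    intro prev hprev x hx
    have hv : ∃ v : Int, 1 ≤ v ∧ lrunAux prev (c :: rest) = v :: lrunAux (some (c, v)) rest := by
      cases prev with
      | none => exact ⟨1, by norm_num, rfl⟩
      | some p =>
        rcases p with ⟨c', v'⟩
        by_cases hcc : c' = c
        · exact ⟨v' + 1, by have := hprev c' v' rfl; omega, by simp [lrunAux, hcc]⟩
        · exact ⟨1, by norm_num, by simp [lrunAux, hcc]⟩
    obtain ⟨v, hv1, heq⟩ := hv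
    rw [heq, List.mem_cons] at hx
    rcases hx with rfl | hx
    · exact hv1
    · refine ih (some (c, v)) ?_ x hx
      intro c0 v0 h
      cases h
      omega

theorem lrunAux_getD_pos (cs : List Char) (q : Nat) (hq : q < cs.length) :
    1 ≤ (lrunAux none cs).getD q 0 := by
  have hl : q < (lrunAux none cs).length := by rw [lrunAux_length]; exact hq
  rw [List.getD_eq_getElem?_getD, List.getElem?_eq_getElem hl]
  exact lrunAux_mem_pos cs none (by intro _ _ h; cases h) _ (List.getElem_mem hl)

theorem floordiv_two_pos (a : Int) (ha : 2 ≤ a) : 1 ≤ PySem.Int.floordiv a 2 := by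
  rw [PySem.Int.le_floordiv_iff_mul_le (by norm_num)]
  omega

-- the `while lo < hi and s[lo] == s[hi]` loop of B, with the run-length jump;
-- s[lo]/s[hi]/run[lo]/lrun[hi] read via getD ∘ toNat, exact because the loop only
-- reads indices with 0 ≤ lo < hi < len(s) (the range test below only totalizes it)
def tpJump (cs : List Char) (lo hi : Int) : Int × Int :=
  if h : lo < hi ∧ 0 ≤ lo ∧ hi < (cs.length : Int) ∧
      cs.getD lo.toNat default = cs.getD hi.toNat default then
    let t := min (min ((runList cs).getD lo.toNat 0) ((lrunAux none cs).getD hi.toNat 0))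
                 (PySem.Int.floordiv (hi - lo + 1) 2)
    tpJump cs (lo + t) (hi - t)
  else (lo, hi)
termination_by (hi - lo).toNat
decreasing_by
  have h1 : 1 ≤ (runList cs).getD lo.toNat 0 := by
    apply runList_getD_pos
    omega
  have h2 : 1 ≤ (lrunAux none cs).getD hi.toNat 0 := by
    apply lrunAux_getD_pos
    omega
  have h3 : 1 ≤ PySem.Int.floordiv (hi - lo + 1) 2 := floordiv_two_pos _ (by omega)
  have ht : 1 ≤ t := le_min (le_min h1 h2) h3
  omega

def countNumWays_alt (s : String) (k : Int) : Int :=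
  let cs := s.toList
  (PySem.List.pyRange 0 (PySem.Str.len s - k + 1) 1).foldl
    (fun count i =>
      let p := tpJump cs i (i + k - 1)
      if p.1 < p.2 ∧ cs.getD p.2.toNat default < cs.getD p.1.toNat default
      then count + 1 else count) 0

-- ===== PRECONDITION & SPEC =====
-- Pre_ excludes negative k (a window LENGTH, so outside the task's natural domain): there
-- Python's negative slice stop i+k counts from the END of s, so A counts substrings of
-- other lengths — an artefact of slicing; B naturally returns 0 on such k.
def Pre_countNumWays (s : String) (k : Int) : Prop := 0 ≤ k
instance (s : String) (k : Int) : Decidable (Pre_countNumWays s k) := by unfold Pre_countNumWays; infer_instance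
def pvWitness_countNumWays : String × Int := ("abcba", 2)

def Spec_countNumWays (s : String) (k : Int) (out : Int) : Prop := out = countNumWays_alt s k
instance (s : String) (k : Int) (out : Int) : Decidable (Spec_countNumWays s k out) := by unfold Spec_countNumWays; infer_instance

-- ===== CLAIM (what is proved, stated in full; the proofs are below) =====
def Claim_equal_countNumWays : Prop := ∀ (s : String) (k : Int), Dom_countNumWays s k → Pre_countNumWays s k → Spec_countNumWays s k (countNumWays s k)

-- ===== LEMMAS AND PROOFS =====

-- single-step peeling loop: the reference the jump loop is compared with
def tpLoop (cs : List Char) (lo hi : Int) : Int × Int :=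
  if h : lo < hi ∧ cs.getD lo.toNat default = cs.getD hi.toNat default then
    tpLoop cs (lo + 1) (hi - 1)
  else (lo, hi)
termination_by (hi - lo).toNat
decreasing_by omega



-- lex order on equal-length prefixes with arbitrary tails
theorem append_lt_append (u : List Char) : ∀ (v w w' : List Char), u.length = v.length →
    ((u ++ w) < (v ++ w') ↔ u < v ∨ (u = v ∧ w < w')) := by
  induction u with
  | nil =>
    intro v w w' h
    have hv : v = [] := by simpa using h.symm
    subst hv
    simp
  | cons a u ih =>
    intro v w w' h
    cases v with
    | nil => simp at h
    | cons b v =>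
      simp at h
      simp only [List.cons_append, List.cons_lt_cons_iff, ih v w w' h, List.cons.injEq]
      constructor
      · rintro (hab | ⟨rfl, (huv | ⟨rfl, hw⟩)⟩)
        · exact Or.inl (Or.inl hab)
        · exact Or.inl (Or.inr ⟨rfl, huv⟩)
        · exact Or.inr ⟨⟨rfl, rfl⟩, hw⟩
      · rintro ((hab | ⟨rfl, huv⟩) | ⟨⟨rfl, rfl⟩, hw⟩)
        · exact Or.inl hab
        · exact Or.inr ⟨rfl, Or.inl huv⟩
        · exact Or.inr ⟨rfl, Or.inr ⟨rfl, hw⟩⟩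

-- B's verdict for the window [a, b] of cs, as the port computes it
def bVerdict (cs : List Char) (lo hi : Int) : Bool :=
  let p := tpLoop cs lo hi
  decide (p.1 < p.2 ∧ cs.getD p.2.toNat default < cs.getD p.1.toNat default)

-- the window [a, b] (inclusive) of cs as a list
def window (cs : List Char) (a b : Nat) : List Char := (cs.drop a).take (b + 1 - a)

-- decomposition of a window with at least two elements
theorem window_decomp (cs : List Char) (a b : Nat) (hab : a < b) (hb : b < cs.length) :
    ∃ ha : a < cs.length,
      window cs a b = cs[a] :: window cs (a + 1) (b - 1) ++ [cs[b]] := by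
  have ha : a < cs.length := lt_trans hab hb
  refine ⟨ha, ?_⟩
  unfold window
  rw [List.drop_eq_getElem_cons ha]
  have h1 : b + 1 - a = (b - a - 1 + 1) + 1 := by omega
  rw [h1, List.take_succ_cons]
  have hidx : b - a - 1 < (cs.drop (a + 1)).length := by
    rw [List.length_drop]; omega
  rw [List.take_add_one, List.getElem?_eq_getElem hidx, List.getElem_drop]
  have h2 : a + 1 + (b - a - 1) = b := by omega
  have h3 : b - 1 + 1 - (a + 1) = b - a - 1 := by omega
  simp [h2, h3]

-- core: reversed window < window  ↔  B's two-pointer verdict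
theorem win_core (cs : List Char) : ∀ (m a b : Nat), b + 1 - a ≤ m → b < cs.length →
    decide ((window cs a b).reverse < window cs a b) = bVerdict cs (a : Int) (b : Int) := by
  intro m
  induction m with
  | zero =>
    intro a b hm hb
    have hw : window cs a b = [] := by unfold window; simp; omega
    have hnc : ¬ ((a : Int) < (b : Int) ∧ cs.getD (a:Int).toNat default = cs.getD (b:Int).toNat default) := by
      rintro ⟨h1, -⟩; omega
    have hloop : tpLoop cs (a : Int) (b : Int) = ((a : Int), (b : Int)) := by
      rw [tpLoop, dif_neg hnc]
    rw [hw]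
    unfold bVerdict
    rw [hloop]
    simp
    omega
  | succ m ih =>
    intro a b hm hb
    rcases lt_trichotomy a b with hab | rfl | hba
    · -- a < b : at least two elements
      obtain ⟨ha, hdec⟩ := window_decomp cs a b hab hb
      have hgda : cs.getD (a:Int).toNat default = cs[a] := by
        simp [List.getD_eq_getElem?_getD, List.getElem?_eq_getElem ha]
      have hgdb : cs.getD (b:Int).toNat default = cs[b] := by
        simp [List.getD_eq_getElem?_getD, List.getElem?_eq_getElem hb]
      by_cases heq : cs[a] = cs[b]
      · -- equal ends: peel and recurse
        have hc : ((a : Int) < (b : Int) ∧ cs.getD (a:Int).toNat default = cs.getD (b:Int).toNat default) := by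
          refine ⟨by omega, ?_⟩; rw [hgda, hgdb, heq]
        have hloop : tpLoop cs (a : Int) (b : Int) = tpLoop cs ((a : Int) + 1) ((b : Int) - 1) := by
          rw [tpLoop, dif_pos hc]
        have hcast1 : ((a : Int) + 1) = ((a + 1 : Nat) : Int) := by push_cast; ring
        have hcast2 : ((b : Int) - 1) = ((b - 1 : Nat) : Int) := by omega
        have hrhs : bVerdict cs (a : Int) (b : Int) = bVerdict cs ((a+1 : Nat) : Int) ((b-1 : Nat) : Int) := by
          unfold bVerdict; rw [hloop, hcast1, hcast2]
        rw [hrhs, ← ih (a+1) (b-1) (by omega) (by omega)]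
        rw [hdec]
        set mid := window cs (a+1) (b-1) with hmid
        have hrev : ((cs[a] :: (mid ++ [cs[b]])).reverse) = cs[b] :: (mid.reverse ++ [cs[a]]) := by
          simp
        have hshape : (cs[a] :: mid ++ [cs[b]]) = cs[a] :: (mid ++ [cs[b]]) := by
          simp
        rw [hshape, hrev]
        have hiff : (cs[b] :: (mid.reverse ++ [cs[a]])) < (cs[a] :: (mid ++ [cs[b]])) ↔ mid.reverse < mid := by
          rw [heq, List.cons_lt_cons_iff]
          constructor
          · rintro (h | ⟨-, h⟩)
            · exact absurd h (lt_irrefl _)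
            · rw [append_lt_append _ _ _ _ (by simp)] at h
              rcases h with h | ⟨-, h⟩
              · exact h
              · exact absurd h (List.lt_irrefl _)
          · intro h
            exact Or.inr ⟨rfl, by
              rw [append_lt_append _ _ _ _ (by simp)]
              exact Or.inl h⟩
        rw [decide_eq_decide.mpr hiff]
      · -- mismatched ends: both sides decide cs[b] < cs[a]
        have hnc : ¬ ((a : Int) < (b : Int) ∧ cs.getD (a:Int).toNat default = cs.getD (b:Int).toNat default) := by
          rintro ⟨-, h⟩; rw [hgda, hgdb] at h; exact heq h
        have hloop : tpLoop cs (a : Int) (b : Int) = ((a : Int), (b : Int)) := by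
          rw [tpLoop, dif_neg hnc]
        have hrhs : bVerdict cs (a : Int) (b : Int) = decide (cs[b] < cs[a]) := by
          unfold bVerdict
          rw [hloop]
          simp only [hgda, hgdb]
          rw [decide_eq_decide.mpr]
          constructor
          · rintro ⟨-, h⟩; exact h
          · intro h; exact ⟨by exact_mod_cast hab, h⟩
        rw [hrhs, hdec]
        set mid := window cs (a+1) (b-1) with hmid
        have hrev : ((cs[a] :: (mid ++ [cs[b]])).reverse) = cs[b] :: (mid.reverse ++ [cs[a]]) := by
          simp
        have hshape : (cs[a] :: mid ++ [cs[b]]) = cs[a] :: (mid ++ [cs[b]]) := by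
          simp
        rw [hshape, hrev]
        have hiff : (cs[b] :: (mid.reverse ++ [cs[a]])) < (cs[a] :: (mid ++ [cs[b]])) ↔ cs[b] < cs[a] := by
          rw [List.cons_lt_cons_iff]
          constructor
          · rintro (h | ⟨h, -⟩)
            · exact h
            · exact absurd h.symm heq
          · exact fun h => Or.inl h
        rw [decide_eq_decide.mpr hiff]
    · -- a = b : one element
      have hw : window cs a a = [cs[a]] := by
        unfold window
        have h1 : a + 1 - a = 1 := by omega
        rw [h1, List.drop_eq_getElem_cons hb, List.take_succ_cons, List.take_zero]
      have hnc : ¬ ((a : Int) < (a : Int) ∧ cs.getD (a:Int).toNat default = cs.getD (a:Int).toNat default) := by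
        rintro ⟨h1, -⟩; omega
      have hloop : tpLoop cs (a : Int) (a : Int) = ((a : Int), (a : Int)) := by
        rw [tpLoop, dif_neg hnc]
      rw [hw]
      unfold bVerdict
      rw [hloop]
      simp
    · -- a > b : empty window
      have hw : window cs a b = [] := by unfold window; simp; omega
      have hnc : ¬ ((a : Int) < (b : Int) ∧ cs.getD (a:Int).toNat default = cs.getD (b:Int).toNat default) := by
        rintro ⟨h1, -⟩; omega
      have hloop : tpLoop cs (a : Int) (b : Int) = ((a : Int), (b : Int)) := by
        rw [tpLoop, dif_neg hnc]
      rw [hw]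
      unfold bVerdict
      rw [hloop]
      simp
      omega

-- per-window agreement, for 0 ≤ i ≤ len − k and 0 ≤ k
theorem per_window (cs : List Char) (k i : Int) (hk : 0 ≤ k) (hi : 0 ≤ i)
    (hin : i < (cs.length : Int) - k + 1) :
    (isSmallerA (PySem.List.slice cs (some i) (some (i + k))) = true ↔
      bVerdict cs i (i + k - 1) = true) := by
  rcases eq_or_lt_of_le hk with hk0 | hkpos
  · -- k = 0 : empty window, both false
    subst hk0
    have hsl : PySem.List.slice cs (some i) (some (i + 0)) = [] := by
      obtain ⟨a, rfl⟩ := Int.eq_ofNat_of_zero_le hi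
      rw [add_zero, PySem.List.slice_natCast]
      simp
    have hnc : ¬ (i < i + 0 - 1 ∧ cs.getD i.toNat default = cs.getD (i + 0 - 1).toNat default) := by
      rintro ⟨h1, -⟩; omega
    have hloop : tpLoop cs i (i + 0 - 1) = (i, i + 0 - 1) := by
      rw [tpLoop, dif_neg hnc]
    rw [hsl]
    unfold isSmallerA bVerdict
    rw [hloop]
    simp
  · -- k ≥ 1
    obtain ⟨a, rfl⟩ := Int.eq_ofNat_of_zero_le hi
    obtain ⟨kn, rfl⟩ := Int.eq_ofNat_of_zero_le hk
    have hkn : 1 ≤ kn := by exact_mod_cast hkpos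
    have hb : a + kn - 1 < cs.length := by
      have := hin
      omega
    have hsl : PySem.List.slice cs (some (a : Int)) (some ((a : Int) + (kn : Int))) = window cs a (a + kn - 1) := by
      have : (a : Int) + (kn : Int) = ((a + kn : Nat) : Int) := by push_cast; ring
      rw [this, PySem.List.slice_natCast]
      unfold window
      congr 1
      omega
    have hcast : (a : Int) + (kn : Int) - 1 = ((a + kn - 1 : Nat) : Int) := by omega
    rw [hsl]
    unfold isSmallerA
    rw [hcast, win_core cs (a + kn - 1 + 1) a (a + kn - 1) (by omega) hb]


-- every character inside run[p]'s run equals s[p]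
theorem runList_spec (cs : List Char) : ∀ (p t : Nat),
    p < cs.length → (t : Int) < (runList cs).getD p 0 →
    p + t < cs.length ∧ cs.getD (p + t) default = cs.getD p default := by
  induction cs with
  | nil => intro p t hp ht; simp at hp
  | cons c rest ih =>
    intro p t hp ht
    cases p with
    | succ p' =>
      have hcons : (runList (c :: rest)).getD (p' + 1) 0 = (runList rest).getD p' 0 := by
        cases rest with
        | nil => simp at hp
        | cons c' rest' =>
          obtain ⟨v, vs, hr, hcc⟩ := runList_cons_cons c c' rest'
          rw [hcc, List.getD_cons_succ, hr]
      rw [hcons] at ht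
      have hp' : p' < rest.length := by simpa using hp
      obtain ⟨h1, h2⟩ := ih p' t hp' ht
      refine ⟨by simp; omega, ?_⟩
      have e1 : p' + 1 + t = (p' + t) + 1 := by omega
      rw [e1, List.getD_cons_succ, List.getD_cons_succ, h2]
    | zero =>
      cases rest with
      | nil =>
        have hv : (runList [c]).getD 0 0 = 1 := by
          simp [runList]
        rw [hv] at ht
        have ht0 : t = 0 := by omega
        subst ht0
        exact ⟨by simp, rfl⟩
      | cons c' rest' =>
        obtain ⟨v, vs, hr, hcc⟩ := runList_cons_cons c c' rest'
        rw [hcc, List.getD_cons_zero] at ht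
        cases t with
        | zero => exact ⟨by simp, rfl⟩
        | succ t' =>
          -- t ≥ 1 forces the heads to be equal and t' < v
          have hceq : c' = c := by
            by_contra hne
            rw [if_neg hne] at ht
            omega
          rw [if_pos hceq] at ht
          have ht' : (t' : Int) < (runList (c' :: rest')).getD 0 0 := by
            rw [hr, List.getD_cons_zero]
            push_cast at ht ⊢
            omega
          obtain ⟨h1, h2⟩ := ih 0 t' (by simp) ht'
          refine ⟨by simpa using h1, ?_⟩
          have e1 : 0 + (t' + 1) = t' + 1 := by omega
          rw [e1, List.getD_cons_succ]
          have e2 : (c' :: rest').getD (0 + t') default = (c' :: rest').getD 0 default := h2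
          rw [Nat.zero_add] at e2
          rw [e2, List.getD_cons_zero, List.getD_cons_zero, hceq]

-- invariant of lrunAux: prev = some (c0, v0) certifies a run of v0 copies of c0 ending
-- just before offset off in the full list
theorem lrunAux_spec_aux (full : List Char) : ∀ (rest : List Char) (off : Nat)
    (prev : Option (Char × Int)),
    full.drop off = rest →
    (∀ c0 v0, prev = some (c0, v0) → 1 ≤ v0 ∧ (v0 : Int) ≤ (off : Int) ∧
        ∀ t : Nat, (t : Int) < v0 → full.getD (off - 1 - t) default = c0) →
    ∀ (j t : Nat), j < rest.length → (t : Int) < (lrunAux prev rest).getD j 0 →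
    t ≤ off + j ∧ full.getD (off + j - t) default = full.getD (off + j) default := by
  intro rest
  induction rest with
  | nil => intro off prev hdrop hprev j t hj ht; simp at hj
  | cons c rest' ih =>
    intro off prev hdrop hprev j t hj ht
    have hofflt : off < full.length := by
      by_contra hge
      rw [List.drop_eq_nil_of_le (by omega)] at hdrop
      simp at hdrop
    have hoffc : full.getD off default = c := by
      have hlen0 : 0 < (full.drop off).length := by rw [hdrop]; simp
      have h0 : (full.drop off)[0]'hlen0 = c := by
        simp only [hdrop]
        rfl
      rw [List.getElem_drop] at h0
      rw [List.getD_eq_getElem?_getD, List.getElem?_eq_getElem (by omega)]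
      simpa using h0
    -- the value written at this position, and the invariant it satisfies
    obtain ⟨v, hv1, hvle, hvrun, heq⟩ :
        ∃ v : Int, 1 ≤ v ∧ (v : Int) ≤ ((off + 1 : Nat) : Int) ∧
          (∀ t : Nat, (t : Int) < v → full.getD (off + 1 - 1 - t) default = c) ∧
          lrunAux prev (c :: rest') = v :: lrunAux (some (c, v)) rest' := by
      cases prev with
      | none =>
        refine ⟨1, le_refl _, by push_cast; omega, ?_, rfl⟩
        intro t htv
        have : t = 0 := by omega
        subst this
        simpa using hoffc
      | some p =>
        rcases p with ⟨c0, v0⟩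
        obtain ⟨hp1, hp2, hp3⟩ := hprev c0 v0 rfl
        by_cases hcc : c0 = c
        · refine ⟨v0 + 1, by omega, by push_cast; omega, ?_, by simp [lrunAux, hcc]⟩
          intro t htv
          cases t with
          | zero => simpa using hoffc
          | succ t' =>
            have e1 : off + 1 - 1 - (t' + 1) = off - 1 - t' := by omega
            rw [e1, hp3 t' (by push_cast at htv ⊢; omega), hcc]
        · refine ⟨1, le_refl _, by push_cast; omega, ?_, by simp [lrunAux, hcc]⟩
          intro t htv
          have : t = 0 := by omega
          subst this
          simpa using hoffc
    rw [heq] at ht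
    cases j with
    | zero =>
      rw [List.getD_cons_zero] at ht
      refine ⟨by have := hvle; push_cast at this; omega, ?_⟩
      have h1 := hvrun t ht
      have e1 : off + 1 - 1 - t = off - t := by omega
      rw [e1] at h1
      rw [Nat.add_zero, h1, hoffc]
    | succ j' =>
      rw [List.getD_cons_succ] at ht
      have hdrop' : full.drop (off + 1) = rest' := by
        have h1 : full.drop (off + 1) = (full.drop off).drop 1 := by
          rw [List.drop_drop]
        rw [h1, hdrop]; rfl
      have hprev' : ∀ c0 v0, (some (c, v) : Option (Char × Int)) = some (c0, v0) →
          1 ≤ v0 ∧ (v0 : Int) ≤ ((off + 1 : Nat) : Int) ∧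
          ∀ t : Nat, (t : Int) < v0 → full.getD (off + 1 - 1 - t) default = c0 := by
        intro c0 v0 h
        cases h
        exact ⟨hv1, hvle, hvrun⟩
      have hj' : j' < rest'.length := by simpa using hj
      obtain ⟨h1, h2⟩ := ih (off + 1) (some (c, v)) hdrop' hprev' j' t hj' ht
      refine ⟨by omega, ?_⟩
      have e1 : off + (j' + 1) = off + 1 + j' := by omega
      rw [e1]
      exact h2

-- every character inside lrun[q]'s run equals s[q]
theorem lrun_spec (cs : List Char) : ∀ (q t : Nat),
    q < cs.length → (t : Int) < (lrunAux none cs).getD q 0 →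
    t ≤ q ∧ cs.getD (q - t) default = cs.getD q default := by
  intro q t hq ht
  have := lrunAux_spec_aux cs cs 0 none (by simp) (by intro _ _ h; cases h) q t hq ht
  simpa using this

-- peeling through t0 known-equal strict pairs
theorem tpLoop_multi (cs : List Char) (t0 : Nat) : ∀ (lo hi : Int),
    (∀ u : Nat, u < t0 → lo + u < hi - u ∧
      cs.getD (lo + u).toNat default = cs.getD (hi - u).toNat default) →
    tpLoop cs lo hi = tpLoop cs (lo + t0) (hi - t0) := by
  induction t0 with
  | zero => intro lo hi _; norm_num
  | succ t0' ih =>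
    intro lo hi h
    have h0 := h 0 (by omega)
    have hc : lo < hi ∧ cs.getD lo.toNat default = cs.getD hi.toNat default := by
      constructor
      · have := h0.1; push_cast at this; omega
      · simpa using h0.2
    rw [tpLoop, dif_pos hc]
    have hstep := ih (lo + 1) (hi - 1) (by
      intro u hu
      have := h (u + 1) (by omega)
      push_cast at this ⊢
      constructor
      · have := this.1; omega
      · have h2 := this.2
        have e1 : lo + 1 + (u : Int) = lo + ((u : Int) + 1) := by ring
        have e2 : hi - 1 - (u : Int) = hi - ((u : Int) + 1) := by ring
        rw [e1, e2]
        exact h2)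
    rw [hstep]
    congr 1 <;> push_cast <;> ring

-- the jump loop computes exactly what the single-step loop computes (in range)
theorem tpJump_eq (cs : List Char) : ∀ (m : Nat) (lo hi : Int), (hi - lo).toNat ≤ m →
    0 ≤ lo → hi < (cs.length : Int) →
    tpJump cs lo hi = tpLoop cs lo hi := by
  intro m
  induction m with
  | zero =>
    intro lo hi hm hlo hhi
    have hba : ¬ lo < hi := by omega
    rw [tpJump, dif_neg (by rintro ⟨h1, -⟩; omega), tpLoop, dif_neg (by rintro ⟨h1, -⟩; omega)]
  | succ m ih =>
    intro lo hi hm hlo hhi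
    by_cases hc : lo < hi ∧ cs.getD lo.toNat default = cs.getD hi.toNat default
    · have hcJ : lo < hi ∧ 0 ≤ lo ∧ hi < (cs.length : Int) ∧
          cs.getD lo.toNat default = cs.getD hi.toNat default := ⟨hc.1, hlo, hhi, hc.2⟩
      rw [tpJump, dif_pos hcJ]
      set t := min (min ((runList cs).getD lo.toNat 0) ((lrunAux none cs).getD hi.toNat 0))
                   (PySem.Int.floordiv (hi - lo + 1) 2) with htdef
      have hlen : lo.toNat < cs.length ∧ hi.toNat < cs.length := by
        constructor <;> omega
      have ht1 : 1 ≤ t := by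
        refine le_min (le_min ?_ ?_) (floordiv_two_pos _ (by omega))
        · exact runList_getD_pos cs lo.toNat hlen.1
        · exact lrunAux_getD_pos cs hi.toNat hlen.2
      have hhalf : t * 2 ≤ hi - lo + 1 := by
        have h1 : t ≤ PySem.Int.floordiv (hi - lo + 1) 2 := min_le_right _ _
        have h2 : PySem.Int.floordiv (hi - lo + 1) 2 * 2 ≤ hi - lo + 1 := by
          rw [← PySem.Int.le_floordiv_iff_mul_le (by norm_num)]
        nlinarith
      have hpairs : ∀ u : Nat, (u : Int) < t → lo + u < hi - u ∧
          cs.getD (lo + u).toNat default = cs.getD (hi - u).toNat default := by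
        intro u hu
        refine ⟨by omega, ?_⟩
        have hrun : (u : Int) < (runList cs).getD lo.toNat 0 := lt_of_lt_of_le hu
          (le_trans (min_le_left _ _) (min_le_left _ _))
        have hlrun : (u : Int) < (lrunAux none cs).getD hi.toNat 0 := lt_of_lt_of_le hu
          (le_trans (min_le_left _ _) (min_le_right _ _))
        obtain ⟨-, hrr⟩ := runList_spec cs lo.toNat u hlen.1 hrun
        obtain ⟨-, hll⟩ := lrun_spec cs hi.toNat u hlen.2 hlrun
        have e1 : (lo + u).toNat = lo.toNat + u := by omega
        have e2 : (hi - u).toNat = hi.toNat - u := by omega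
        rw [e1, e2, hrr, hll, hc.2]
      have hmulti := tpLoop_multi cs t.toNat lo hi (by
        intro u hu
        exact hpairs u (by omega))
      have hcast : ((t.toNat : Nat) : Int) = t := by omega
      rw [hcast] at hmulti
      rw [ih (lo + t) (hi - t) (by omega) (by omega) (by omega)]
      exact hmulti.symm
    · rw [tpJump, dif_neg (by rintro ⟨h1, -, -, h4⟩; exact hc ⟨h1, h4⟩),
          tpLoop, dif_neg hc]
-- ===== VERDICT (by name: the statement is the Claim_ definition above) =====
theorem countNumWays_spec : Claim_equal_countNumWays := by
  intro s k _hdom hk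
  unfold Spec_countNumWays countNumWays countNumWays_alt
  simp only [PySem.Str.len_eq]
  apply PySem.List.foldl_congr_mem
  intro acc i hi
  rw [PySem.List.mem_pyRange_one] at hi
  have hjump : tpJump s.toList i (i + k - 1) = tpLoop s.toList i (i + k - 1) := by
    apply tpJump_eq s.toList (i + k - 1 - i).toNat i (i + k - 1) le_rfl hi.1
    have := hi.2
    omega
  have h := per_window s.toList k i hk hi.1 (by exact_mod_cast hi.2)
  by_cases hA : isSmallerA (PySem.List.slice s.toList (some i) (some (i + k))) = true
  · rw [if_pos hA]
    have hB := h.mp hA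
    unfold bVerdict at hB
    rw [hjump]
    rw [if_pos (by simpa using hB)]
  · rw [if_neg hA]
    have hB : ¬ bVerdict s.toList i (i + k - 1) = true := fun hb => hA (h.mpr hb)
    unfold bVerdict at hB
    rw [hjump]
    rw [if_neg (by simpa using hB)]
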